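-- pv_equiv track=rewrite | github.com/s-jinipark/pythonTest | COS_Lvl2/St2-1/D1/InitArray02.py | solution
-- ===== SOURCE A (Python) =====
-- def solution(row, col):
--     result = [[0 for _ in range(col)] for _ in range(row)]
--     num = 1
--
--     for c in range(col):
--         for r in range(row):
--             result[r][c] = num
--             num+=1
--
--     return result
-- ===== SOURCE B (Python) =====
-- def solution(row, col):
--     # Closed form: cell (r, c) holds its 1-based column-major index, no counter needed.
--     return [[c * row + r + 1 for c in range(col)] for r in range(row)]
-- ===== Notes on version B (the rewrite author's own statement) =====
-- stated objective: idiomatic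
-- what changed: B drops the zero-matrix preallocation and the mutable running counter and instead builds the matrix row-major in one comprehension, computing each cell directly from its coordinates by the closed form c*row + r + 1.
import Mathlib
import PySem

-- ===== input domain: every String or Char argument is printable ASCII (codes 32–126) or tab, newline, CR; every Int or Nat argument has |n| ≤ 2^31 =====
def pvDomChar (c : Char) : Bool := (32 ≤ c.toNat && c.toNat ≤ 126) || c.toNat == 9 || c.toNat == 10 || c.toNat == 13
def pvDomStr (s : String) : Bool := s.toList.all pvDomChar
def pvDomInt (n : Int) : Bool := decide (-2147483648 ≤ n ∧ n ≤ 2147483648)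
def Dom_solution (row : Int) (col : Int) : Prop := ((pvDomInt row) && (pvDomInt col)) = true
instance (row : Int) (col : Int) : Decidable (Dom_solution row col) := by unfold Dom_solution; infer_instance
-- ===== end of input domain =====

-- B replaces A's preallocated zero matrix and running counter by a closed form: cell (r, c)
-- is computed directly as c*row + r + 1, building the result row-major in one comprehension.

-- ===== PORT A =====
def solution (row : Int) (col : Int) : List (List Int) :=
  let result : List (List Int) :=
    (PySem.List.pyRange 0 row 1).map (fun _ => (PySem.List.pyRange 0 col 1).map (fun _ => (0 : Int)))
  let st :=
    (PySem.List.pyRange 0 col 1).foldl (fun (st : List (List Int) × Int) c =>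
      (PySem.List.pyRange 0 row 1).foldl (fun (st2 : List (List Int) × Int) r =>
        (PySem.List.pySetD st2.1 r (PySem.List.pySetD (PySem.List.pyGetD st2.1 r []) c st2.2),
         st2.2 + 1)) st) (result, 1)
  st.1

-- ===== PORT B =====
def solution_alt (row : Int) (col : Int) : List (List Int) :=
  (PySem.List.pyRange 0 row 1).map (fun r =>
    (PySem.List.pyRange 0 col 1).map (fun c => c * row + r + 1))

-- ===== PRECONDITION & SPEC =====
def Spec_solution (row : Int) (col : Int) (out : List (List Int)) : Prop := out = solution_alt row col
instance (row : Int) (col : Int) (out : List (List Int)) : Decidable (Spec_solution row col out) := by unfold Spec_solution; infer_instance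

-- ===== CLAIM (what is proved, stated in full; the proofs are below) =====
def Claim_equal_solution : Prop := ∀ (row : Int) (col : Int), Dom_solution row col → Spec_solution row col (solution row col)

-- ===== LEMMAS AND PROOFS =====
lemma set_map_range {α : Type} (R j : Nat) (g : Nat → α) (v : α) :
    ((List.range R).map g).set j v = (List.range R).map (fun r => if r = j then v else g r) := by
  apply List.ext_getElem
  · simp
  · intro i hi hi2
    simp only [List.getElem_set, List.getElem_map, List.getElem_range]
    rcases eq_or_ne i j with h | h
    · simp [h]
    · simp [h, Ne.symm h]

lemma inner_loop (c num : Int) (hc : 0 ≤ c) (R : Nat) (f : Nat → List Int) (j : Nat)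
    (hj : j ≤ R) :
    List.foldl (fun (st2 : List (List Int) × Int) r =>
        (PySem.List.pySetD st2.1 r (PySem.List.pySetD (PySem.List.pyGetD st2.1 r []) c st2.2),
         st2.2 + 1))
      ((List.range R).map f, num) (PySem.List.pyRange 0 (j : Int) 1)
    = ((List.range R).map (fun r => if r < j then (f r).set c.toNat (num + r) else f r),
       num + j) := by
  induction j with
  | zero => simp
  | succ j ih =>
    rw [show ((j + 1 : Nat) : Int) = (j : Int) + 1 by push_cast; ring,
        PySem.List.pyRange_one_succ_right (Int.natCast_nonneg j), List.foldl_append,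
        ih (by omega)]
    simp only [List.foldl_cons, List.foldl_nil]
    rw [PySem.List.pyGetD_natCast, PySem.List.getD_map_range _ _ _ _ (by omega : j < R)]
    simp only [PySem.List.pySetD_natCast, PySem.List.pySetD_of_nonneg _ _ hc]
    rw [set_map_range]
    simp only [Prod.mk.injEq]
    constructor
    · simp only [show ¬ (j < j) by omega, if_false]
      apply List.map_congr_left
      intro r _
      rcases eq_or_ne r j with h | h
      · simp [h]
      · by_cases h2 : r < j <;> simp [h, h2] <;> omega
    · ring

lemma outer_loop (R C : Nat) (k : Nat) (hk : k ≤ C) :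
    List.foldl (fun (st : List (List Int) × Int) c =>
        (PySem.List.pyRange 0 (R : Int) 1).foldl (fun (st2 : List (List Int) × Int) r =>
          (PySem.List.pySetD st2.1 r (PySem.List.pySetD (PySem.List.pyGetD st2.1 r []) c st2.2),
           st2.2 + 1)) st)
      ((List.range R).map (fun _ => (List.range C).map (fun _ => (0 : Int))), 1)
      (PySem.List.pyRange 0 (k : Int) 1)
    = ((List.range R).map (fun (r : Nat) =>
         (List.range C).map (fun (c : Nat) =>
           if c < k then (c : Int) * (R : Int) + (r : Int) + 1 else 0)),
       ((k * R : Nat) : Int) + 1) := by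
  induction k with
  | zero => simp
  | succ k ih =>
    rw [show ((k + 1 : Nat) : Int) = (k : Int) + 1 by push_cast; ring,
        PySem.List.pyRange_one_succ_right (Int.natCast_nonneg k), List.foldl_append,
        ih (by omega)]
    simp only [List.foldl_cons, List.foldl_nil]
    rw [inner_loop _ _ (Int.natCast_nonneg k) R _ R le_rfl]
    simp only [Prod.mk.injEq]
    constructor
    · apply List.map_congr_left
      intro r hr
      simp only [List.mem_range] at hr
      rw [if_pos hr, Int.toNat_natCast, set_map_range]
      apply List.map_congr_left
      intro c _
      rcases eq_or_ne c k with h | h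
      · simp only [h, if_pos (by omega : k < k + 1)]
        push_cast; ring
      · by_cases h2 : c < k <;> simp [h, h2] <;> omega
    · push_cast; ring

-- ===== VERDICT (by name: the statement is the Claim_ definition above) =====
theorem solution_spec : Claim_equal_solution := by
  intro row col _
  unfold Spec_solution
  by_cases hr : 0 ≤ row
  · by_cases hc : 0 ≤ col
    · obtain ⟨R, rfl⟩ : ∃ R : Nat, row = (R : Int) := ⟨row.toNat, (Int.toNat_of_nonneg hr).symm⟩
      obtain ⟨C, rfl⟩ : ∃ C : Nat, col = (C : Int) := ⟨col.toNat, (Int.toNat_of_nonneg hc).symm⟩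
      show ((PySem.List.pyRange 0 (C:Int) 1).foldl _ (_, 1)).1 = _
      rw [show ((PySem.List.pyRange 0 (R:Int) 1).map
            (fun _ => (PySem.List.pyRange 0 (C:Int) 1).map (fun _ => (0:Int))))
          = (List.range R).map (fun _ => (List.range C).map (fun _ => (0:Int))) by
        simp [PySem.List.pyRange_zero_nat, List.map_map, Function.comp_def]]
      rw [outer_loop R C C le_rfl]
      simp only [solution_alt, PySem.List.pyRange_zero_nat, List.map_map, Function.comp_def]
      apply List.map_congr_left
      intro r _
      apply List.map_congr_left
      intro c hcm
      simp only [List.mem_range] at hcm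
      rw [if_pos hcm]
    · have h0 : PySem.List.pyRange 0 col 1 = [] := by
        rw [PySem.List.pyRange_one]
        simp only [List.map_eq_nil_iff, List.range_eq_nil]
        omega
      simp [solution, solution_alt, h0]
  · have h0 : PySem.List.pyRange 0 row 1 = [] := by
      rw [PySem.List.pyRange_one]
      simp only [List.map_eq_nil_iff, List.range_eq_nil]
      omega
    simp [solution, solution_alt, h0]
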